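-- pv_equiv track=rewrite | github.com/akshxl09/Programmers_quiz | python/LEVEL 1/신규 아이디 추천.py | solution
-- ===== SOURCE A (Python) =====
-- def check(new_id):
--     check='abcdefghijklmnopqrstuvwxyz0123456789-_.'
--     tmp=''
--     for i in new_id:
--         if i in check:
--             tmp+=i
--     return tmp
--
-- def continuous_point(new_id):
--     cnt=0
--     tmp=''
--     for i in new_id:
--         if i =='.':
--             cnt+=1
--         else:
--             cnt=0
--
--         if cnt>1:
--             cnt-=1
--             continue
--         tmp+=i
--     return tmp
--
-- def start_finish(new_id):
--
--     if new_id=='.':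
--         return ''
--
--     if new_id[0] == '.':
--         new_id=new_id[1:]
--
--     if new_id[-1] == '.':
--         new_id=new_id[:-1]
--
--     return new_id
--
-- def solution(new_id):
--     new_id = new_id.lower()
--     new_id = check(new_id)
--     new_id = continuous_point(new_id)
--     new_id = start_finish(new_id)
--
--     if not new_id:
--         new_id='a'
--
--     if len(new_id) >15:
--         new_id=new_id[:15]
--         new_id=start_finish(new_id)
--
--     while len(new_id) < 3:
--         new_id=new_id+new_id[-1]
--
--     return new_id
-- ===== SOURCE B (Python) =====
-- import re
--
-- def solution(new_id):
--     s = new_id.lower()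
--     s = re.sub(r'[^a-z0-9._-]', '', s)
--     s = re.sub(r'\.+', '.', s)
--     s = re.sub(r'^\.|\.$', '', s)
--     if not s:
--         s = 'a'
--     if len(s) > 15:
--         s = s[:15]
--         if s.endswith('.'):
--             s = s[:-1]
--     return s.ljust(3, s[-1])
-- ===== Notes on version B (the rewrite author's own statement) =====
-- stated objective: idiomatic
-- what changed: Replaces the three hand-written character-accumulation loops (filter loop, dot-run counter loop, index-based strip) with three regex substitutions (drop disallowed chars, collapse dot runs, strip a leading/trailing dot) and the padding while-loop with str.ljust; the passes run in C, a constant-factor speedup.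
import Mathlib
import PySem

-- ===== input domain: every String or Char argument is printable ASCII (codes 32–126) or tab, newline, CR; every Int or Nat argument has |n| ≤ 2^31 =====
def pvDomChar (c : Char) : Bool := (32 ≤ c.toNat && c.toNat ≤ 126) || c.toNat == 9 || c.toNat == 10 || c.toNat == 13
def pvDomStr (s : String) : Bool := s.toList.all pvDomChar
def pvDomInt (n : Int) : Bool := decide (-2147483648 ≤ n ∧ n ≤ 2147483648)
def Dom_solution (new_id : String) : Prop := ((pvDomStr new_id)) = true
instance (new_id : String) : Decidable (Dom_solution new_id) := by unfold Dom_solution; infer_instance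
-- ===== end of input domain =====

-- B replaces A's three character-accumulation loops with the regex pipeline
-- (drop disallowed chars, collapse dot runs, strip one leading/trailing dot) and the
-- padding while-loop with str.ljust; same return value wherever A returns (Pre_).

-- ===== PORT A =====
def allowedA : List Char := "abcdefghijklmnopqrstuvwxyz0123456789-_.".toList

-- check(new_id): accumulate the characters that lie in the allowed string
def checkA (l : List Char) : List Char :=
  l.foldl (fun tmp i => if allowedA.contains i then tmp ++ [i] else tmp) []

-- one step of continuous_point's loop, state = (cnt, tmp)
def cpStep (st : Int × List Char) (i : Char) : Int × List Char :=
  let cnt := if i = '.' then st.1 + 1 else 0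
  if cnt > 1 then (cnt - 1, st.2) else (cnt, st.2 ++ [i])

def continuousA (l : List Char) : List Char := (l.foldl cpStep (0, [])).2

-- start_finish; new_id[0] / new_id[-1] modelled by head?/getLast? (none = IndexError,
-- reachable only on the empty string, which Pre_ excludes)
def startFinishA (l : List Char) : List Char :=
  if l = ['.'] then []
  else
    let l := if l.head? = some '.' then l.drop 1 else l
    if l.getLast? = some '.' then l.dropLast else l

-- while len(new_id) < 3: new_id = new_id + new_id[-1]  (getLast? none = IndexError, unreachable here)
def padA (l : List Char) : List Char :=
  if _h : l.length < 3 then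
    match l.getLast? with
    | some c => padA (l ++ [c])
    | none => l
  else l
termination_by 3 - l.length
decreasing_by simp; omega

def solution (new_id : String) : String :=
  let l := (PySem.Str.lower new_id).toList
  let l := checkA l
  let l := continuousA l
  let l := startFinishA l
  let l := if l = [] then ['a'] else l
  let l := if l.length > 15 then startFinishA (l.take 15) else l
  String.ofList (padA l)

-- ===== PORT B =====
-- re.sub(r'\.+', '.', s): left-to-right scan, the flag records being inside a dot run
def collapseAux : Bool → List Char → List Char
  | _, [] => []
  | inRun, c :: r =>
      if c = '.' then
        if inRun then collapseAux true r else '.' :: collapseAux true r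
      else c :: collapseAux false r

def collapseB (l : List Char) : List Char := collapseAux false l

-- re.sub(r'^\.|\.$', '', s): the matches are one leading dot and one trailing dot
def stripB (l : List Char) : List Char :=
  let l := if l.head? = some '.' then l.drop 1 else l
  if l.getLast? = some '.' then l.dropLast else l

def solution_alt (new_id : String) : String :=
  let l := (PySem.Str.lower new_id).toList
  -- re.sub(r'[^a-z0-9._-]', '', s): keep exactly the characters of the class
  let l := l.filter (fun c => allowedA.contains c)
  let l := collapseB l
  let l := stripB l
  let l := if l = [] then ['a'] else l
  let l := if l.length > 15 then
             (let t := l.take 15; if t.getLast? = some '.' then t.dropLast else t)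
           else l
  -- s.ljust(3, s[-1])
  String.ofList (l ++ List.replicate (3 - l.length) (l.getLastD 'a'))

-- ===== PRECONDITION & SPEC =====
-- Pre_ excludes exactly the inputs on which A raises IndexError: those whose lowercased
-- form contains no character of the allowed class (start_finish then indexes '').
def Pre_solution (new_id : String) : Prop :=
  ((PySem.Str.lower new_id).toList.any
    (fun c => ("abcdefghijklmnopqrstuvwxyz0123456789-_.".toList).contains c)) = true
instance (new_id : String) : Decidable (Pre_solution new_id) := by unfold Pre_solution; infer_instance

def pvWitness_solution : String := "ab.c"

def Spec_solution (new_id : String) (out : String) : Prop := out = solution_alt new_id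
instance (new_id : String) (out : String) : Decidable (Spec_solution new_id out) := by unfold Spec_solution; infer_instance

-- ===== CLAIM (what is proved, stated in full; the proofs are below) =====
def Claim_equal_solution : Prop := ∀ (new_id : String), Dom_solution new_id → Pre_solution new_id → Spec_solution new_id (solution new_id)

-- ===== LEMMAS AND PROOFS =====

lemma checkA_eq_filter (l : List Char) : checkA l = l.filter (fun c => allowedA.contains c) := by
  simpa [checkA] using PySem.List.foldl_append_if_eq_filter (fun c => allowedA.contains c) (l := l) (acc := [])

lemma cp_pair (l : List Char) :
    (∀ tmp, (List.foldl cpStep (0, tmp) l).2 = tmp ++ collapseAux false l) ∧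
    (∀ tmp, (List.foldl cpStep (1, tmp) l).2 = tmp ++ collapseAux true l) := by
  induction l with
  | nil => simp [collapseAux]
  | cons c r ih =>
    by_cases hc : c = '.'
    · subst hc
      refine ⟨fun tmp => ?_, fun tmp => ?_⟩
      · have hs : cpStep (0, tmp) '.' = (1, tmp ++ ['.']) := by simp [cpStep]
        rw [List.foldl_cons, hs, ih.2 (tmp ++ ['.'])]
        simp [collapseAux]
      · have hs : cpStep (1, tmp) '.' = (1, tmp) := by norm_num [cpStep]
        rw [List.foldl_cons, hs, ih.2 tmp]
        simp [collapseAux]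
    · refine ⟨fun tmp => ?_, fun tmp => ?_⟩
      · have hs : cpStep (0, tmp) c = (0, tmp ++ [c]) := by simp [cpStep, hc]
        rw [List.foldl_cons, hs, ih.1 (tmp ++ [c])]
        simp [collapseAux, hc]
      · have hs : cpStep (1, tmp) c = (0, tmp ++ [c]) := by simp [cpStep, hc]
        rw [List.foldl_cons, hs, ih.1 (tmp ++ [c])]
        simp [collapseAux, hc]

lemma continuousA_eq (l : List Char) : continuousA l = collapseB l := by
  simpa [continuousA, collapseB] using (cp_pair l).1 []

lemma sf_eq_strip (l : List Char) : startFinishA l = stripB l := by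
  by_cases h : l = ['.']
  · subst h; rfl
  · simp [startFinishA, stripB, h]

lemma head_collapseAux_true (l : List Char) : (collapseAux true l).head? ≠ some '.' := by
  induction l with
  | nil => simp [collapseAux]
  | cons c r ih =>
    by_cases hc : c = '.'
    · simpa [collapseAux, hc] using ih
    · simp [collapseAux, hc]

lemma head_strip_tail (x : Char) (t : List Char) (hx : x ≠ '.') :
    (if (x :: t).getLast? = some '.' then (x :: t).dropLast else x :: t).head? ≠ some '.' := by
  split
  · cases t with
    | nil => simp
    | cons y u => simp [hx]
  · simp [hx]

-- the stripped, collapsed string never starts with a dot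
lemma strip_collapse_head (l : List Char) : (stripB (collapseB l)).head? ≠ some '.' := by
  cases l with
  | nil => simp [collapseB, collapseAux, stripB]
  | cons c r =>
    by_cases hc : c = '.'
    · subst hc
      rw [show collapseB ('.' :: r) = '.' :: collapseAux true r from by
        simp [collapseB, collapseAux]]
      cases hm : collapseAux true r with
      | nil => simp [stripB]
      | cons x t =>
        have hx : x ≠ '.' := by
          have := head_collapseAux_true r; rw [hm] at this; simpa using this
        have hs : stripB ('.' :: x :: t) =
            (if (x :: t).getLast? = some '.' then (x :: t).dropLast else x :: t) := by
          simp [stripB]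
        rw [hs]; exact head_strip_tail x t hx
    · rw [show collapseB (c :: r) = c :: collapseAux false r from by
        simp [collapseB, collapseAux, hc]]
      have hs : stripB (c :: collapseAux false r) =
          (if (c :: collapseAux false r).getLast? = some '.' then
            (c :: collapseAux false r).dropLast else c :: collapseAux false r) := by
        simp [stripB, hc]
      rw [hs]; exact head_strip_tail c (collapseAux false r) hc

lemma pad_closed (l : List Char) (h : l ≠ []) :
    padA l = l ++ List.replicate (3 - l.length) (l.getLastD 'a') := by
  match l with
  | [x] =>
    have h1 : padA [x] = padA [x, x] := by rw [padA]; rfl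
    have h2 : padA [x, x] = padA [x, x, x] := by rw [padA]; rfl
    have h3 : padA [x, x, x] = [x, x, x] := by rw [padA]; rfl
    rw [h1, h2, h3]; rfl
  | [x, y] =>
    have h1 : padA [x, y] = padA [x, y, y] := by rw [padA]; rfl
    have h2 : padA [x, y, y] = [x, y, y] := by rw [padA]; rfl
    rw [h1, h2]; rfl
  | x :: y :: z :: t =>
    have hn : ¬ (x :: y :: z :: t).length < 3 := by simp
    rw [padA]
    simp only [hn]
    simp

theorem solution_eq (new_id : String) (_hp : Pre_solution new_id) :
    solution new_id = solution_alt new_id := by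
  unfold solution solution_alt
  simp only [checkA_eq_filter, continuousA_eq, sf_eq_strip]
  set m := stripB (collapseB (List.filter (fun c => allowedA.contains c)
    (PySem.Str.lower new_id).toList)) with hm
  set l2 := if m = [] then ['a'] else m with hl2
  have hl2ne : l2 ≠ [] := by
    rw [hl2]; split
    · simp
    · assumption
  have hhead : l2.head? ≠ some '.' := by
    by_cases hme : m = []
    · rw [hl2, if_pos hme]; simp
    · rw [hl2, if_neg hme, hm]; exact strip_collapse_head _
  by_cases hlen : l2.length > 15
  · have htlen : (l2.take 15).length = 15 := by simp; omega
    have hthead : (l2.take 15).head? ≠ some '.' := by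
      cases hc : l2 with
      | nil => simp [hc] at hl2ne
      | cons a r => rw [hc] at hhead; simpa using hhead
    have hsf : stripB (l2.take 15) =
        (if (l2.take 15).getLast? = some '.' then (l2.take 15).dropLast else l2.take 15) := by
      simp only [stripB]
      rw [if_neg hthead]
    rw [if_pos hlen, if_pos hlen, hsf]
    set t3 := (if (l2.take 15).getLast? = some '.' then (l2.take 15).dropLast else l2.take 15)
      with ht3
    have ht3ne : t3 ≠ [] := by
      rw [ht3]; split
      · intro he
        have := congrArg List.length he
        simp [htlen] at this
      · intro he; rw [he] at htlen; simp at htlen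
    rw [pad_closed t3 ht3ne]
  · rw [if_neg hlen, if_neg hlen, pad_closed l2 hl2ne]

-- ===== VERDICT (by name: the statement is the Claim_ definition above) =====
theorem solution_spec : Claim_equal_solution := by
  intro s _ hp; exact solution_eq s hp
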